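-- pv_equiv track=rewrite | github.com/noelmagondim/restaurant-orders | src/analyze_log.py | never_visited_days
-- ===== SOURCE A (Python) =====
-- def never_visited_days(orders, client):
--     days = set(
--         order[2]
--         for order in orders
--     )
--
--     client_days = set(
--         order[2]
--         for order in orders
--         if order[0] == client
--     )
--
--     return days - client_days
-- ===== SOURCE B (Python) =====
-- def never_visited_days(orders, client):
--     by_day = {}
--     for order in orders:
--         by_day.setdefault(order[2], []).append(order[0])
--     return {day for day, names in by_day.items() if client not in names}
-- ===== Notes on version B (the rewrite author's own statement) =====
-- stated objective: alternative
-- what changed: Replaces the two set-comprehension passes plus set difference with a single grouping pass building a day->clients index, then a filter over that index keeping days whose client list lacks the client.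
import Mathlib
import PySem

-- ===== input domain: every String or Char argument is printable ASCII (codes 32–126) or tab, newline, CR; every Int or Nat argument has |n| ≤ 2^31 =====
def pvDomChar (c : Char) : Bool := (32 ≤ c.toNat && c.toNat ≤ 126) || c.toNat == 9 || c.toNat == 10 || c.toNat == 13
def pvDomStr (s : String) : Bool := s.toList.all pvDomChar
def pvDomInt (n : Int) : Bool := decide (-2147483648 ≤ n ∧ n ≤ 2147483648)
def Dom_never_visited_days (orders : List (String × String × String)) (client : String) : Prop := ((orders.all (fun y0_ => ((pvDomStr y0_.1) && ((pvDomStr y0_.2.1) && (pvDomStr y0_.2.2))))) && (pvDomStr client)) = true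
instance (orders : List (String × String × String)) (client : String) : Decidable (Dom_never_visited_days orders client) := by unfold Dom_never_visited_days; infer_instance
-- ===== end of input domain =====

-- B replaces A's two set-comprehension passes plus set difference by one grouping pass
-- into a day→clients index followed by a filter over that index (objective: alternative).

-- ===== PORT A =====
def never_visited_days (orders : List (String × String × String)) (client : String) : List String :=
  let days : PySem.Set String := PySem.Set.ofList (orders.map (fun o => o.2.2))
  let client_days : PySem.Set String :=
    PySem.Set.ofList ((orders.filter (fun o => o.1 == client)).map (fun o => o.2.2))
  PySem.Set.diff days client_days

-- ===== PORT B =====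
def never_visited_days_alt (orders : List (String × String × String)) (client : String) : List String :=
  let byDay : PySem.Dict String (List String) :=
    orders.foldl (fun d o => d.modify o.2.2 [] (fun l => l ++ [o.1])) PySem.Dict.empty
  PySem.Set.ofList
    (((PySem.Dict.items byDay).filter (fun kv => !(kv.2.contains client))).map (fun kv => kv.1))

-- ===== PRECONDITION & SPEC =====
def Spec_never_visited_days (orders : List (String × String × String)) (client : String) (out : List String) : Prop := out = never_visited_days_alt orders client
instance (orders : List (String × String × String)) (client : String) (out : List String) : Decidable (Spec_never_visited_days orders client out) := by unfold Spec_never_visited_days; infer_instance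

-- ===== CLAIM (what is proved, stated in full; the proofs are below) =====
def Claim_equal_never_visited_days : Prop := ∀ (orders : List (String × String × String)) (client : String), Dom_never_visited_days orders client → Spec_never_visited_days orders client (never_visited_days orders client)

-- ===== LEMMAS AND PROOFS =====

theorem diff_eq_filter {α : Type} [BEq α] (s t : PySem.Set α) :
    PySem.Set.diff s t = s.filter (fun x => !(PySem.Set.contains t x)) := by
  simp [PySem.Set.diff, PySem.Set.contains]

theorem byDay_eq_pairs_fold (orders : List (String × String × String)) :
    orders.foldl (fun d (o : String × String × String) => d.modify o.2.2 [] (fun l => l ++ [o.1]))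
        (PySem.Dict.empty : PySem.Dict String (List String))
      = (orders.map (fun o => (o.2.2, o.1))).foldl
          (fun d p => d.modify p.1 [] (fun l => l ++ [p.2])) PySem.Dict.empty := by
  rw [List.foldl_map]

theorem never_visited_days_eq (orders : List (String × String × String)) (client : String) :
    never_visited_days orders client = never_visited_days_alt orders client := by
  unfold never_visited_days never_visited_days_alt
  dsimp only
  rw [byDay_eq_pairs_fold]
  set pairs := orders.map (fun o => (o.2.2, o.1)) with hpairs
  set byDay := pairs.foldl (fun d p => d.modify p.1 [] (fun l => l ++ [p.2]))
      (PySem.Dict.empty : PySem.Dict String (List String)) with hbd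
  have hkeys : byDay.keys = PySem.Set.ofList (orders.map (fun o => o.2.2)) := by
    rw [hbd]
    rw [PySem.Dict.keys_foldl_modify_key pairs (fun p => p.1) [] (fun _ p => (fun l => l ++ [p.2]))]
    rw [PySem.Dict.keys_empty, PySem.Set.update_nil_left, hpairs, List.map_map]
    rfl
  have hnd : byDay.keys.Nodup := by rw [hkeys]; exact PySem.Set.nodup_ofList _
  have hitems : byDay.items = byDay.keys.map (fun k => (k, byDay.getD k [])) := by
    exact PySem.Dict.items_eq_map_keys byDay hnd []
  have hgetD : ∀ k, byDay.getD k [] = (pairs.filter (fun p => p.1 == k)).map (fun p => p.2) := by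
    intro k
    rw [hbd, PySem.Dict.getD_foldl_modify_append, PySem.Dict.getD_empty]
    simp
  rw [hitems, hkeys, diff_eq_filter, List.filter_map]
  rw [List.map_map]
  have hmapfst : (fun (kv : String × List String) => kv.1) ∘
      (fun k => (k, byDay.getD k [])) = id := rfl
  rw [hmapfst, List.map_id]
  refine Eq.trans ?_ (PySem.Set.ofList_eq_self_of_nodup _ ((PySem.Set.nodup_ofList _).filter _)).symm
  apply List.filter_congr
  intro day _
  simp only [Function.comp, hgetD day]
  congr 1
  rw [Bool.eq_iff_iff]
  simp only [List.contains_iff_mem, List.mem_map, List.mem_filter,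
    beq_iff_eq, hpairs, Prod.exists]
  aesop

-- ===== VERDICT (by name: the statement is the Claim_ definition above) =====
theorem never_visited_days_spec : Claim_equal_never_visited_days := by
  intro orders client _
  exact never_visited_days_eq orders client
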